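-- pv_equiv track=rewrite | github.com/WildMeOrg/wildbook-ia | wbia/algo/detect/train_assigner.py | _bbox_intersections
-- ===== SOURCE A (Python) =====
-- def _bbox_intersections(bboxes_a, bboxes_b):
--     corner_bboxes_a = _bbox_to_corner_format(bboxes_a)
--     corner_bboxes_b = _bbox_to_corner_format(bboxes_b)
--
--     intersect_xtls = [
--         max(xtl_a, xtl_b)
--         for ((xtl_a, _, _, _), (xtl_b, _, _, _)) in zip(corner_bboxes_a, corner_bboxes_b)
--     ]
--
--     intersect_ytls = [
--         max(ytl_a, ytl_b)
--         for ((_, ytl_a, _, _), (_, ytl_b, _, _)) in zip(corner_bboxes_a, corner_bboxes_b)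
--     ]
--
--     intersect_xbrs = [
--         min(xbr_a, xbr_b)
--         for ((_, _, xbr_a, _), (_, _, xbr_b, _)) in zip(corner_bboxes_a, corner_bboxes_b)
--     ]
--
--     intersect_ybrs = [
--         min(ybr_a, ybr_b)
--         for ((_, _, _, ybr_a), (_, _, _, ybr_b)) in zip(corner_bboxes_a, corner_bboxes_b)
--     ]
--
--     intersect_widths = [
--         int_xbr - int_xtl for int_xbr, int_xtl in zip(intersect_xbrs, intersect_xtls)
--     ]
--
--     intersect_heights = [
--         int_ybr - int_ytl for int_ybr, int_ytl in zip(intersect_ybrs, intersect_ytls)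
--     ]
--
--     intersect_bboxes = list(
--         zip(intersect_xtls, intersect_ytls, intersect_widths, intersect_heights)
--     )
--
--     return intersect_bboxes
--
-- def _bbox_to_corner_format(bboxes):
--     corner_bboxes = [
--         (bbox[0], bbox[1], bbox[0] + bbox[2], bbox[1] + bbox[3]) for bbox in bboxes
--     ]
--     return corner_bboxes
-- ===== SOURCE B (Python) =====
-- def _bbox_intersections(bboxes_a, bboxes_b):
--     corner_bboxes_a = _bbox_to_corner_format(bboxes_a)
--     corner_bboxes_b = _bbox_to_corner_format(bboxes_b)
--     result = []
--     for (xtl_a, ytl_a, xbr_a, ybr_a), (xtl_b, ytl_b, xbr_b, ybr_b) in zip(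
--         corner_bboxes_a, corner_bboxes_b
--     ):
--         xtl = max(xtl_a, xtl_b)
--         ytl = max(ytl_a, ytl_b)
--         xbr = min(xbr_a, xbr_b)
--         ybr = min(ybr_a, ybr_b)
--         result.append((xtl, ytl, xbr - xtl, ybr - ytl))
--     return result
--
--
-- def _bbox_to_corner_format(bboxes):
--     corner_bboxes = [
--         (bbox[0], bbox[1], bbox[0] + bbox[2], bbox[1] + bbox[3]) for bbox in bboxes
--     ]
--     return corner_bboxes
-- ===== Notes on version B (the rewrite author's own statement) =====
-- stated objective: simpler
-- what changed: Replaces A's six column-wise comprehensions (each re-zipping the corner lists) and the final 4-way zip by one row-wise pass over the zipped corner lists that builds each output tuple directly.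
import Mathlib
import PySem

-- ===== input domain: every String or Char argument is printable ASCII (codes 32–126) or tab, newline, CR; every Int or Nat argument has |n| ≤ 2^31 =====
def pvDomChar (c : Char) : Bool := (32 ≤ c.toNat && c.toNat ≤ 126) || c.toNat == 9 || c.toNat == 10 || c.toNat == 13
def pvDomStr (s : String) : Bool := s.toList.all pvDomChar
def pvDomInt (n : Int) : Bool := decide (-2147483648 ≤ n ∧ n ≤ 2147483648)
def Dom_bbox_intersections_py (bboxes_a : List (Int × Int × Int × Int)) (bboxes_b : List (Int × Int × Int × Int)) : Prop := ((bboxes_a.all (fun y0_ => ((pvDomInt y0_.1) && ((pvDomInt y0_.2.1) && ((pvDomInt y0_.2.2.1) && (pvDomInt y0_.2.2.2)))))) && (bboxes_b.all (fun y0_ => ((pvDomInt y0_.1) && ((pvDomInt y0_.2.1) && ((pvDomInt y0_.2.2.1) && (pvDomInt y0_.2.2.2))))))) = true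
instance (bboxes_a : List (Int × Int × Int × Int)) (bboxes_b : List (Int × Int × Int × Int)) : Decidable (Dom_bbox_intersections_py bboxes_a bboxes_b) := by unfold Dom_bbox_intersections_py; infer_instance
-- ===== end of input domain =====

-- B fuses A's six column-wise comprehensions and final 4-way zip into one row-wise pass (simpler; return value only).

-- ===== PORT A =====
-- _bbox_to_corner_format
def bbox_to_corner_format (bboxes : List (Int × Int × Int × Int)) : List (Int × Int × Int × Int) :=
  bboxes.map (fun bbox => (bbox.1, bbox.2.1, bbox.1 + bbox.2.2.1, bbox.2.1 + bbox.2.2.2))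

def bbox_intersections_py (bboxes_a : List (Int × Int × Int × Int)) (bboxes_b : List (Int × Int × Int × Int)) : List (Int × Int × Int × Int) :=
  let corner_bboxes_a := bbox_to_corner_format bboxes_a
  let corner_bboxes_b := bbox_to_corner_format bboxes_b
  let intersect_xtls := (corner_bboxes_a.zip corner_bboxes_b).map (fun p => max p.1.1 p.2.1)
  let intersect_ytls := (corner_bboxes_a.zip corner_bboxes_b).map (fun p => max p.1.2.1 p.2.2.1)
  let intersect_xbrs := (corner_bboxes_a.zip corner_bboxes_b).map (fun p => min p.1.2.2.1 p.2.2.2.1)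
  let intersect_ybrs := (corner_bboxes_a.zip corner_bboxes_b).map (fun p => min p.1.2.2.2 p.2.2.2.2)
  let intersect_widths := (intersect_xbrs.zip intersect_xtls).map (fun p => p.1 - p.2)
  let intersect_heights := (intersect_ybrs.zip intersect_ytls).map (fun p => p.1 - p.2)
  -- list(zip(xtls, ytls, widths, heights))
  ((intersect_xtls.zip intersect_ytls).zip (intersect_widths.zip intersect_heights)).map
    (fun p => (p.1.1, p.1.2, p.2.1, p.2.2))

-- ===== PORT B =====
-- the single row-wise loop over zip(corner_bboxes_a, corner_bboxes_b)
def bbox_intersections_go : List (Int × Int × Int × Int) → List (Int × Int × Int × Int) → List (Int × Int × Int × Int)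
  | (xa, ya, pa, qa) :: ta, (xb, yb, pb, qb) :: tb =>
      let xtl := max xa xb
      let ytl := max ya yb
      let xbr := min pa pb
      let ybr := min qa qb
      (xtl, ytl, xbr - xtl, ybr - ytl) :: bbox_intersections_go ta tb
  | _, _ => []

def bbox_intersections_py_alt (bboxes_a : List (Int × Int × Int × Int)) (bboxes_b : List (Int × Int × Int × Int)) : List (Int × Int × Int × Int) :=
  let corner_bboxes_a := bbox_to_corner_format bboxes_a
  let corner_bboxes_b := bbox_to_corner_format bboxes_b
  bbox_intersections_go corner_bboxes_a corner_bboxes_b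

-- ===== PRECONDITION & SPEC =====
def Spec_bbox_intersections_py (bboxes_a : List (Int × Int × Int × Int)) (bboxes_b : List (Int × Int × Int × Int)) (out : List (Int × Int × Int × Int)) : Prop := out = bbox_intersections_py_alt bboxes_a bboxes_b
instance (bboxes_a : List (Int × Int × Int × Int)) (bboxes_b : List (Int × Int × Int × Int)) (out : List (Int × Int × Int × Int)) : Decidable (Spec_bbox_intersections_py bboxes_a bboxes_b out) := by unfold Spec_bbox_intersections_py; infer_instance

-- ===== CLAIM (what is proved, stated in full; the proofs are below) =====
def Claim_equal_bbox_intersections_py : Prop := ∀ (bboxes_a : List (Int × Int × Int × Int)) (bboxes_b : List (Int × Int × Int × Int)), Dom_bbox_intersections_py bboxes_a bboxes_b → Spec_bbox_intersections_py bboxes_a bboxes_b (bbox_intersections_py bboxes_a bboxes_b)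

-- ===== LEMMAS AND PROOFS =====
-- A's column-wise construction, applied to any two corner lists, equals one row-wise pass.
theorem columns_eq_go (ca cb : List (Int × Int × Int × Int)) :
    (((( (ca.zip cb).map (fun p => max p.1.1 p.2.1)).zip ((ca.zip cb).map (fun p => max p.1.2.1 p.2.2.1))).zip
      (((((ca.zip cb).map (fun p => min p.1.2.2.1 p.2.2.2.1)).zip ((ca.zip cb).map (fun p => max p.1.1 p.2.1))).map (fun p => p.1 - p.2)).zip
       (((((ca.zip cb).map (fun p => min p.1.2.2.2 p.2.2.2.2)).zip ((ca.zip cb).map (fun p => max p.1.2.1 p.2.2.1))).map (fun p => p.1 - p.2))))).map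
      (fun p => (p.1.1, p.1.2, p.2.1, p.2.2))) = bbox_intersections_go ca cb := by
  induction ca generalizing cb with
  | nil => cases cb <;> rfl
  | cons a ta ih =>
      cases cb with
      | nil => rfl
      | cons b tb =>
          obtain ⟨xa, ya, pa, qa⟩ := a
          obtain ⟨xb, yb, pb, qb⟩ := b
          simp only [List.zip_cons_cons, List.map_cons, bbox_intersections_go, ih tb]

-- ===== VERDICT (by name: the statement is the Claim_ definition above) =====
theorem bbox_intersections_py_spec : Claim_equal_bbox_intersections_py := by
  intro bboxes_a bboxes_b _
  unfold Spec_bbox_intersections_py bbox_intersections_py bbox_intersections_py_alt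
  exact columns_eq_go _ _
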